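-- pv_equiv track=rewrite | github.com/vilius-valiusis/2018_SOFT8033_SDH4_A01_ViliusValiusis | Hint1/my_reducer.py | build_top_entries_dict
-- ===== SOURCE A (Python) =====
-- def build_top_entries_dict(list_sorted_results,num_top_entries):
--     top_entries = dict()
--     count_entries = dict()
--
--     for key,value in list_sorted_results:
--         if key[0] not in count_entries:
--             count_entries[key[0]] = 1
--             top_entries[key[0],key[1]] = value
--         elif count_entries[key[0]] < num_top_entries:
--             count_entries[key[0]] += 1
--             top_entries[key[0],key[1]] = value
--
--
--     return top_entries
-- ===== SOURCE B (Python) =====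
-- def build_top_entries_dict(list_sorted_results, num_top_entries):
--     # Group entry positions by primary key, keep each group's first
--     # num_top_entries positions, then build the result dict in one
--     # ordered pass over the kept positions.
--     groups = {}
--     for i, (key, _value) in enumerate(list_sorted_results):
--         groups.setdefault(key[0], []).append(i)
--     keep = set()
--     for positions in groups.values():
--         for rank, i in enumerate(positions):
--             if rank >= num_top_entries:
--                 break
--             keep.add(i)
--     top_entries = {}
--     for i, (key, value) in enumerate(list_sorted_results):
--         if i in keep:
--             top_entries[key[0], key[1]] = value
--     return top_entries
-- ===== Notes on version B (the rewrite author's own statement) =====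
-- stated objective: alternative
-- what changed: Replaces A's single pass with two per-key counter/result dicts by a two-phase decomposition: group input positions by primary key, keep each group's first num_top_entries positions, then build the dict in one ordered pass over the kept positions; Pre_ excludes num_top_entries <= 0, outside the natural domain of keep-top-N, where A's one-entry-per-key result is an artefact of its unconditional first store.
-- outside the precondition, e.g. on build_top_entries_dict([(('a', 'b'), 1)], 0): A returns {('a', 'b'): 1}, B returns {}; on build_top_entries_dict([(('a', 'b'), 1), (('a', 'c'), 2)], -1): A returns {('a', 'b'): 1}, B returns {}
import Mathlib
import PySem

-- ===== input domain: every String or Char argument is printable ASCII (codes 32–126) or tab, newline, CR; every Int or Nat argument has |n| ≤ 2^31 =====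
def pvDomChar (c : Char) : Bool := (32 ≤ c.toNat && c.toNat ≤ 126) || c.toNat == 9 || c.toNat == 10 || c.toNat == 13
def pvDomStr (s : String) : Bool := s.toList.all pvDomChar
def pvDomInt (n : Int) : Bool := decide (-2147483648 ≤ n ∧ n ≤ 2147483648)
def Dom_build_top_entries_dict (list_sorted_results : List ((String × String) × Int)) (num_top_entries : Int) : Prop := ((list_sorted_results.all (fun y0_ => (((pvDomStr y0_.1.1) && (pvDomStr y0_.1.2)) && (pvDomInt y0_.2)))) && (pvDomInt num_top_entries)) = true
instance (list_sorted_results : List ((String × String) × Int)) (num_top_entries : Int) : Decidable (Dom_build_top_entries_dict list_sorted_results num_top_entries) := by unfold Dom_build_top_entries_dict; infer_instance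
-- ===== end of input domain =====

-- B groups entry positions by primary key, keeps each group's first num_top_entries positions,
-- and rebuilds the dict in one ordered pass (alternative structure, same cost); Pre_ restricts
-- to num_top_entries ≥ 1, the natural domain (see the comment above Pre_).

-- ===== PORT A =====
-- the loop body of A: state = (top_entries, count_entries)
def pvAstep (num_top_entries : Int)
    (s : PySem.Dict (String × String) Int × PySem.Dict String Int)
    (kv : (String × String) × Int) :
    PySem.Dict (String × String) Int × PySem.Dict String Int :=
  match s.2.get? kv.1.1 with
  | none => (s.1.insert (kv.1.1, kv.1.2) kv.2, s.2.insert kv.1.1 1)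
  | some c =>
      if c < num_top_entries then (s.1.insert (kv.1.1, kv.1.2) kv.2, s.2.insert kv.1.1 (c + 1))
      else s

def build_top_entries_dict (list_sorted_results : List ((String × String) × Int)) (num_top_entries : Int) : List (String × String × Int) :=
  let st := list_sorted_results.foldl (pvAstep num_top_entries) (PySem.Dict.empty, PySem.Dict.empty)
  st.1.items.map (fun q => (q.1.1, q.1.2, q.2))

-- ===== PORT B =====
-- groups.setdefault(key[0], []).append(i)
def pvGroupStep (d : PySem.Dict String (List Int)) (p : Int × ((String × String) × Int)) :
    PySem.Dict String (List Int) :=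
  d.modify p.2.1.1 [] (fun l => l ++ [p.1])

-- inner loop: for rank, i in enumerate(positions): if rank >= num_top_entries: break; keep.add(i)
def pvKeepGroup (num_top_entries : Int) : PySem.Set Int → List (Int × Int) → PySem.Set Int
  | s, [] => s
  | s, (rank, i) :: t =>
      if rank ≥ num_top_entries then s
      else pvKeepGroup num_top_entries (PySem.Set.add s i) t

-- if i in keep: top_entries[key[0], key[1]] = value
def pvBuildStep (keep : PySem.Set Int) (d : PySem.Dict (String × String) Int)
    (p : Int × ((String × String) × Int)) : PySem.Dict (String × String) Int :=
  if PySem.Set.contains keep p.1 then d.insert (p.2.1.1, p.2.1.2) p.2.2 else d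

def build_top_entries_dict_alt (list_sorted_results : List ((String × String) × Int)) (num_top_entries : Int) : List (String × String × Int) :=
  let groups : PySem.Dict String (List Int) :=
    (PySem.List.enumerate list_sorted_results).foldl pvGroupStep PySem.Dict.empty
  let keep : PySem.Set Int :=
    groups.values.foldl
      (fun s positions => pvKeepGroup num_top_entries s (PySem.List.enumerate positions))
      PySem.Set.empty
  let top : PySem.Dict (String × String) Int :=
    (PySem.List.enumerate list_sorted_results).foldl (pvBuildStep keep) PySem.Dict.empty
  top.items.map (fun q => (q.1.1, q.1.2, q.2))

-- ===== PRECONDITION & SPEC =====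
-- Pre_ excludes num_top_entries ≤ 0: such counts lie outside the natural domain of keeping the
-- top num_top_entries entries per key, and A's value there (one entry per primary key, from its
-- unconditional first store) is an artefact of its implementation; B returns an empty dict there.
def Pre_build_top_entries_dict (list_sorted_results : List ((String × String) × Int)) (num_top_entries : Int) : Prop :=
  1 ≤ num_top_entries
instance (list_sorted_results : List ((String × String) × Int)) (num_top_entries : Int) : Decidable (Pre_build_top_entries_dict list_sorted_results num_top_entries) := by unfold Pre_build_top_entries_dict; infer_instance

def pvWitness_build_top_entries_dict : (List ((String × String) × Int)) × Int := ([(("a", "b"), 1), (("a", "c"), 2)], 1)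

def Spec_build_top_entries_dict (list_sorted_results : List ((String × String) × Int)) (num_top_entries : Int) (out : List (String × String × Int)) : Prop := out = build_top_entries_dict_alt list_sorted_results num_top_entries
instance (list_sorted_results : List ((String × String) × Int)) (num_top_entries : Int) (out : List (String × String × Int)) : Decidable (Spec_build_top_entries_dict list_sorted_results num_top_entries out) := by unfold Spec_build_top_entries_dict; infer_instance

-- ===== CLAIM (what is proved, stated in full; the proofs are below) =====
def Claim_equal_build_top_entries_dict : Prop := ∀ (list_sorted_results : List ((String × String) × Int)) (num_top_entries : Int), Dom_build_top_entries_dict list_sorted_results num_top_entries → Pre_build_top_entries_dict list_sorted_results num_top_entries → Spec_build_top_entries_dict list_sorted_results num_top_entries (build_top_entries_dict list_sorted_results num_top_entries)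

-- ===== LEMMAS AND PROOFS =====

-- Reference computation both ports are reduced to: process the list left to right with the
-- already-processed prefix `p` alongside; keep an entry iff fewer than `limit` entries with
-- the same primary key precede it.
def pvRef (limit : Int) :
    List ((String × String) × Int) → List ((String × String) × Int) →
    PySem.Dict (String × String) Int → PySem.Dict (String × String) Int
  | _, [], d => d
  | p, x :: r, d =>
      pvRef limit (p ++ [x]) r
        (if ((p.countP (fun e => e.1.1 == x.1.1) : Int) < limit)
         then d.insert (x.1.1, x.1.2) x.2 else d)

-- positions (enumeration indices, starting at s) of the entries with primary key g
def pvIdx (g : String) (s : Int) (l : List ((String × String) × Int)) : List Int :=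
  ((PySem.List.enumerate l s).filter (fun p => p.2.1.1 == g)).map (·.1)

lemma pvCount_snoc_self (p : List ((String × String) × Int)) (x : (String × String) × Int) :
    (p ++ [x]).countP (fun e => e.1.1 == x.1.1) = p.countP (fun e => e.1.1 == x.1.1) + 1 := by
  simp [List.countP_append]

lemma pvCount_snoc_other (p : List ((String × String) × Int)) (x : (String × String) × Int)
    (g : String) (hg : g ≠ x.1.1) :
    (p ++ [x]).countP (fun e => e.1.1 == g) = p.countP (fun e => e.1.1 == g) := by
  have : (x.1.1 == g) = false := beq_false_of_ne (fun h => hg h.symm)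
  simp [List.countP_append, this]

lemma pvInv_insert (p : List ((String × String) × Int)) (x : (String × String) × Int)
    (cnt : PySem.Dict String Int) (limit V : Int)
    (hinv : ∀ g : String, cnt.get? g =
      if p.countP (fun e => e.1.1 == g) = 0 then none
      else some (min (p.countP (fun e => e.1.1 == g) : Int) limit))
    (hV : V = min ((p.countP (fun e => e.1.1 == x.1.1) : Int) + 1) limit) :
    ∀ g : String, (cnt.insert x.1.1 V).get? g =
      if (p ++ [x]).countP (fun e => e.1.1 == g) = 0 then none
      else some (min ((p ++ [x]).countP (fun e => e.1.1 == g) : Int) limit) := by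
  intro g
  rw [PySem.Dict.get?_insert]
  by_cases hg : g = x.1.1
  · rw [if_pos hg, hg, pvCount_snoc_self,
      if_neg (Nat.succ_ne_zero _), hV]
    push_cast; rfl
  · rw [if_neg hg, pvCount_snoc_other p x g hg, hinv g]

lemma pvA_eq_ref (num_top_entries : Int) :
    ∀ (rest p : List ((String × String) × Int)) (top : PySem.Dict (String × String) Int)
      (cnt : PySem.Dict String Int),
      (∀ g : String, cnt.get? g =
        if p.countP (fun e => e.1.1 == g) = 0 then none
        else some (min (p.countP (fun e => e.1.1 == g) : Int) (max 1 num_top_entries))) →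
      (rest.foldl (pvAstep num_top_entries) (top, cnt)).1 =
        pvRef (max 1 num_top_entries) p rest top := by
  intro rest
  induction rest with
  | nil => intro p top cnt _; simp [pvRef]
  | cons x r ih =>
    intro p top cnt hinv
    have hx := hinv x.1.1
    simp only [List.foldl_cons, pvRef]
    by_cases h0 : p.countP (fun e => e.1.1 == x.1.1) = 0
    · rw [h0] at hx; simp at hx
      have hstep : pvAstep num_top_entries (top, cnt) x =
          (top.insert (x.1.1, x.1.2) x.2, cnt.insert x.1.1 1) := by
        simp [pvAstep, hx]
      rw [hstep, if_pos (by rw [h0]; push_cast; omega)]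
      exact ih _ _ _ (pvInv_insert p x cnt _ 1 hinv (by rw [h0]; push_cast; omega))
    · rw [if_neg h0] at hx
      by_cases hlt :
          (min (p.countP (fun e => e.1.1 == x.1.1) : Int) (max 1 num_top_entries)) < num_top_entries
      · have hstep : pvAstep num_top_entries (top, cnt) x =
            (top.insert (x.1.1, x.1.2) x.2,
             cnt.insert x.1.1
               (min (p.countP (fun e => e.1.1 == x.1.1) : Int) (max 1 num_top_entries) + 1)) := by
          simp [pvAstep, hx, hlt]
        rw [hstep, if_pos (by omega)]
        exact ih _ _ _ (pvInv_insert p x cnt _ _ hinv (by omega))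
      · have hstep : pvAstep num_top_entries (top, cnt) x = (top, cnt) := by
          simp [pvAstep, hx, hlt]
        rw [hstep, if_neg (by omega)]
        apply ih
        intro g
        by_cases hg : g = x.1.1
        · rw [hg, pvCount_snoc_self, if_neg (Nat.succ_ne_zero _), hx]
          have : min ((p.countP (fun e => e.1.1 == x.1.1) : Int)) (max 1 num_top_entries)
              = min ((p.countP (fun e => e.1.1 == x.1.1) : Int) + 1) (max 1 num_top_entries) := by
            omega
          rw [this]; push_cast; rfl
        · rw [pvCount_snoc_other p x g hg, hinv g]

lemma pvGroups_get? :
    ∀ (es : List (Int × ((String × String) × Int))) (d : PySem.Dict String (List Int)) (g : String),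
      (es.foldl pvGroupStep d).get? g =
        if (es.filter (fun p => p.2.1.1 == g)).isEmpty then d.get? g
        else some (d.getD g [] ++ (es.filter (fun p => p.2.1.1 == g)).map (·.1)) := by
  intro es
  induction es with
  | nil => intro d g; simp
  | cons p t ih =>
    intro d g
    have hmod : pvGroupStep d p = d.insert p.2.1.1 ((d.getD p.2.1.1 []) ++ [p.1]) := rfl
    simp only [List.foldl_cons, hmod, List.filter_cons]
    by_cases hp : (p.2.1.1 == g) = true
    · have hpe : p.2.1.1 = g := eq_of_beq hp
      rw [if_pos hp, ih]
      simp only [List.isEmpty_cons, List.map_cons]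
      subst hpe
      by_cases ht : (t.filter (fun q => q.2.1.1 == p.2.1.1)).isEmpty
      · rw [if_pos ht, if_neg (by simp)]
        rw [PySem.Dict.get?_insert_self]
        simp [List.isEmpty_iff.mp ht]
      · rw [if_neg ht, if_neg (by simp)]
        rw [PySem.Dict.getD_insert_self]
        simp
    · have hpe : p.2.1.1 ≠ g := fun h => hp (beq_iff_eq.mpr h)
      rw [if_neg hp, ih]
      rw [PySem.Dict.get?_insert_of_ne _ _ (Ne.symm hpe) , PySem.Dict.getD_insert_of_ne]
      exact Ne.symm hpe

lemma pvIdx_mem_ge (g : String) :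
    ∀ (l : List ((String × String) × Int)) (s i : Int), i ∈ pvIdx g s l → s ≤ i := by
  intro l s i hi
  simp only [pvIdx, List.mem_map, List.mem_filter] at hi
  obtain ⟨p, ⟨hp, _⟩, rfl⟩ := hi
  rw [PySem.List.mem_enumerate_iff] at hp
  obtain ⟨k, _, rfl⟩ := hp
  show s ≤ s + (k : Int)
  omega

lemma pvIdx_take_mem (g : String) :
    ∀ (l : List ((String × String) × Int)) (s : Int) (m j : Nat),
      ((s + (j : Int)) ∈ (pvIdx g s l).take m) ↔
        ∃ h : j < l.length, ((l[j].1.1 == g) = true ∧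
          (l.take j).countP (fun e => e.1.1 == g) < m) := by
  intro l
  induction l with
  | nil => intro s m j; simp [pvIdx]
  | cons x t ih =>
    intro s m j
    have hidx : pvIdx g s (x :: t) =
        (if (x.1.1 == g) = true then [s] else []) ++ pvIdx g (s + 1) t := by
      simp only [pvIdx, PySem.List.enumerate_cons, List.filter_cons]
      by_cases hx : (x.1.1 == g) = true <;> simp [hx]
    by_cases hx : (x.1.1 == g) = true
    · rw [hidx, if_pos hx]
      cases m with
      | zero => simp
      | succ m' =>
        simp only [List.cons_append, List.nil_append]
        rw [List.take_succ_cons]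
        cases j with
        | zero =>
          simp [hx]
        | succ j' =>
          have hne : s + ((j' + 1 : Nat) : Int) ≠ s := by omega
          have hshift : s + ((j' + 1 : Nat) : Int) = (s + 1) + (j' : Int) := by push_cast; omega
          rw [List.mem_cons]
          simp only [hne, false_or]
          rw [hshift, ih (s+1) m' j']
          constructor
          · rintro ⟨h, h1, h2⟩
            refine ⟨by simpa using Nat.succ_lt_succ h, by simpa using h1, ?_⟩
            simp only [List.take_succ_cons, List.countP_cons, hx, if_true]
            omega
          · rintro ⟨h, h1, h2⟩
            refine ⟨by simp only [List.length_cons] at h; omega, by simpa using h1, ?_⟩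
            simp only [List.take_succ_cons, List.countP_cons, hx, if_true] at h2
            omega
    · rw [hidx, if_neg hx]
      simp only [List.nil_append]
      cases j with
      | zero =>
        constructor
        · intro hmem
          exfalso
          have := pvIdx_mem_ge g t (s+1) _ (List.mem_of_mem_take hmem)
          omega
        · rintro ⟨h, h1, _⟩
          simp at h1
          exact absurd h1 (by simpa using hx)
      | succ j' =>
        have hshift : s + ((j' + 1 : Nat) : Int) = (s + 1) + (j' : Int) := by push_cast; omega
        rw [hshift, ih (s+1) m j']
        constructor
        · rintro ⟨h, h1, h2⟩
          refine ⟨by simp only [List.length_cons]; omega, by simpa using h1, ?_⟩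
          simp only [List.take_succ_cons, List.countP_cons, hx, Bool.false_eq_true, if_false]
          omega
        · rintro ⟨h, h1, h2⟩
          refine ⟨by simp only [List.length_cons] at h; omega, by simpa using h1, ?_⟩
          simp only [List.take_succ_cons, List.countP_cons, hx, Bool.false_eq_true, if_false] at h2
          omega

lemma pvKeepGroup_mem (N : Int) :
    ∀ (l : List Int) (s : PySem.Set Int) (r : Int) (x : Int),
      x ∈ pvKeepGroup N s (PySem.List.enumerate l r) ↔
        x ∈ s ∨ x ∈ l.take (N - r).toNat := by
  intro l
  induction l with
  | nil => intro s r x; simp [pvKeepGroup]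
  | cons a t ih =>
    intro s r x
    rw [PySem.List.enumerate_cons]
    simp only [pvKeepGroup]
    by_cases hr : r ≥ N
    · rw [if_pos hr]
      have : (N - r).toNat = 0 := by omega
      simp [this]
    · rw [if_neg hr, ih (PySem.Set.add s a) (r + 1) x]
      have h1 : (N - r).toNat = (N - (r + 1)).toNat + 1 := by omega
      rw [h1, List.take_succ_cons, PySem.Set.mem_add]
      constructor
      · rintro ((h | h) | h)
        · exact Or.inl h
        · exact Or.inr (by simp [h])
        · exact Or.inr (List.mem_cons_of_mem _ h)
      · rintro (h | h)
        · exact Or.inl (Or.inl h)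
        · rcases List.mem_cons.mp h with h | h
          · exact Or.inl (Or.inr h)
          · exact Or.inr h

lemma pvKeepFold (N : Int) :
    ∀ (ls : List (List Int)) (s0 : PySem.Set Int) (x : Int),
      x ∈ ls.foldl
            (fun s positions => pvKeepGroup N s (PySem.List.enumerate positions))
            s0 ↔
        x ∈ s0 ∨ ∃ l ∈ ls, x ∈ l.take N.toNat := by
  intro ls
  induction ls with
  | nil => simp
  | cons a t ih =>
    intro s0 x
    have ha : x ∈ pvKeepGroup N s0 (PySem.List.enumerate a) ↔ x ∈ s0 ∨ x ∈ a.take N.toNat := by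
      have := pvKeepGroup_mem N a s0 0 x
      simpa using this
    simp only [List.foldl_cons, ih, ha, List.mem_cons]
    constructor
    · rintro ((h | h) | h)
      · exact Or.inl h
      · exact Or.inr ⟨a, Or.inl rfl, h⟩
      · obtain ⟨l, hl, hx⟩ := h; exact Or.inr ⟨l, Or.inr hl, hx⟩
    · rintro (h | ⟨l, (rfl | hl), hx⟩)
      · exact Or.inl (Or.inl h)
      · exact Or.inl (Or.inr hx)
      · exact Or.inr ⟨l, hl, hx⟩

lemma pvGroups_keys_nodup (xs : List ((String × String) × Int)) :
    ((PySem.List.enumerate xs).foldl pvGroupStep PySem.Dict.empty).keys.Nodup := by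
  have h := PySem.Dict.keys_foldl_modify_key (PySem.List.enumerate xs)
    (fun p => p.2.1.1) ([] : List Int) (fun _ p => fun l => l ++ [p.1]) PySem.Dict.empty
  have he : (List.foldl (fun d x => d.modify ((fun p => p.2.1.1) x) [] ((fun _ p => fun l => l ++ [p.1]) d x)) PySem.Dict.empty (PySem.List.enumerate xs)) = (PySem.List.enumerate xs).foldl pvGroupStep PySem.Dict.empty := rfl
  rw [he] at h
  rw [h]
  exact PySem.Set.nodup_update _ _ (by simp [PySem.Dict.keys_empty])

lemma pvValues_mem (d : PySem.Dict String (List Int)) (hn : d.keys.Nodup) (l : List Int) :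
    l ∈ d.values ↔ ∃ g, d.get? g = some l := by
  constructor
  · intro hl
    simp only [PySem.Dict.values, List.mem_map] at hl
    obtain ⟨p, hp, rfl⟩ := hl
    exact ⟨p.1, PySem.Dict.get?_of_mem_items d (by simpa using hp) hn⟩
  · rintro ⟨g, hg⟩
    have := PySem.Dict.mem_items_of_get?_eq_some d hg
    simp only [PySem.Dict.values, List.mem_map]
    exact ⟨(g, l), this, rfl⟩

lemma pvKeep_char (xs : List ((String × String) × Int)) (num_top_entries : Int)
    (j : Nat) (hj : j < xs.length) :
    (PySem.Set.contains
        (((PySem.List.enumerate xs).foldl pvGroupStep PySem.Dict.empty).values.foldl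
          (fun s positions => pvKeepGroup num_top_entries s (PySem.List.enumerate positions))
          PySem.Set.empty) ((j : Nat) : Int) = true) ↔
      (xs.take j).countP (fun e => e.1.1 == xs[j].1.1) < num_top_entries.toNat := by
  rw [PySem.Set.contains_iff, pvKeepFold]
  have hempty : ((j : Nat) : Int) ∈ (PySem.Set.empty : PySem.Set Int) ↔ False := by
    simp [PySem.Set.empty]
  rw [hempty, false_or]
  constructor
  · rintro ⟨l, hl, hmem⟩
    rw [pvValues_mem _ (pvGroups_keys_nodup xs) l] at hl
    obtain ⟨g, hg⟩ := hl
    rw [pvGroups_get?] at hg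
    by_cases hE : ((PySem.List.enumerate xs).filter (fun p => p.2.1.1 == g)).isEmpty
    · rw [if_pos hE] at hg; simp [PySem.Dict.get?_empty] at hg
    · rw [if_neg hE] at hg
      simp only [PySem.Dict.getD_empty, List.nil_append] at hg
      have hl' : l = pvIdx g 0 xs := by
        injection hg.symm
      rw [hl'] at hmem
      have hmem' : ((0 : Int) + (j : Int)) ∈ (pvIdx g 0 xs).take num_top_entries.toNat := by
        simpa using hmem
      rw [pvIdx_take_mem] at hmem'
      obtain ⟨h, h1, h2⟩ := hmem'
      have : g = xs[j].1.1 := (eq_of_beq h1).symm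
      rw [← this]
      exact h2
  · intro hcnt
    have hmem : ((0 : Int) + (j : Int)) ∈ (pvIdx (xs[j].1.1) 0 xs).take num_top_entries.toNat := by
      rw [pvIdx_take_mem]
      exact ⟨hj, by simp, hcnt⟩
    have hmem' : ((j : Nat) : Int) ∈ (pvIdx (xs[j].1.1) 0 xs).take num_top_entries.toNat := by
      simpa using hmem
    have hne : pvIdx (xs[j].1.1) 0 xs ≠ [] := by
      intro h
      rw [h] at hmem'
      simp at hmem'
    have hfil : ((PySem.List.enumerate xs).filter (fun p => p.2.1.1 == xs[j].1.1)).isEmpty = false := by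
      rw [List.isEmpty_eq_false_iff]
      intro h
      exact hne (by simp [pvIdx, h])
    refine ⟨pvIdx (xs[j].1.1) 0 xs, ?_, hmem'⟩
    rw [pvValues_mem _ (pvGroups_keys_nodup xs)]
    refine ⟨xs[j].1.1, ?_⟩
    rw [pvGroups_get?, if_neg (by simp [hfil])]
    simp only [PySem.Dict.getD_empty, List.nil_append]
    rfl

lemma pvB_eq_ref (xs : List ((String × String) × Int)) (limit : Int) (m : Nat)
    (keep : PySem.Set Int) (hm : limit = (m : Int))
    (hk : ∀ (j : Nat) (h : j < xs.length),
      (PySem.Set.contains keep ((j : Nat) : Int) = true) ↔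
        (xs.take j).countP (fun e => e.1.1 == (xs[j]'h).1.1) < m) :
    ∀ (rest p : List ((String × String) × Int)) (top : PySem.Dict (String × String) Int),
      xs = p ++ rest →
      (PySem.List.enumerate rest ((p.length : Nat) : Int)).foldl (pvBuildStep keep) top =
        pvRef limit p rest top := by
  intro rest
  induction rest with
  | nil => intro p top _; simp [pvRef]
  | cons x t ih =>
    intro p top hxs
    subst hxs
    rw [PySem.List.enumerate_cons, List.foldl_cons]
    have hlen : p.length < (p ++ x :: t).length := by simp
    have hget : (p ++ x :: t)[p.length]'hlen = x := by
      simp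
    have htake : (p ++ x :: t).take p.length = p := List.take_left
    have hcond : (PySem.Set.contains keep ((p.length : Nat) : Int) = true) ↔
        ((p.countP (fun e => e.1.1 == x.1.1) : Int) < limit) := by
      rw [hk p.length hlen]
      rw [htake]
      rw [hget]
      constructor
      · intro h; omega
      · intro h; omega
    have hstep : pvBuildStep keep top (((p.length : Nat) : Int), x) =
        (if ((p.countP (fun e => e.1.1 == x.1.1) : Int) < limit)
         then top.insert (x.1.1, x.1.2) x.2 else top) := by
      by_cases hc : ((p.countP (fun e => e.1.1 == x.1.1) : Int) < limit)
      · rw [if_pos hc]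
        have htrue := hcond.mpr hc
        simp only [pvBuildStep]
        rw [htrue]
        simp
      · rw [if_neg hc]
        have hfalse : PySem.Set.contains keep ((p.length : Nat) : Int) = false := by
          cases h : PySem.Set.contains keep ((p.length : Nat) : Int) with
          | false => rfl
          | true => exact absurd (hcond.mp h) hc
        simp only [pvBuildStep]
        rw [hfalse]
        simp
    rw [hstep]
    show (PySem.List.enumerate t ((p.length : Int) + 1)).foldl (pvBuildStep keep) _ = pvRef limit (p ++ [x]) t _
    have hlen2 : ((p.length : Int) + 1) = (((p ++ [x]).length : Nat) : Int) := by
      simp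
    rw [hlen2]
    exact ih (p ++ [x]) _ (by simp)

-- the common equality, for num_top_entries ≥ 1
lemma pvAB_eq (xs : List ((String × String) × Int)) (N : Int) (hN : 1 ≤ N) :
    build_top_entries_dict xs N = build_top_entries_dict_alt xs N := by
  simp only [build_top_entries_dict, build_top_entries_dict_alt]
  have hmax : max 1 N = N := by omega
  have hA : (xs.foldl (pvAstep N) (PySem.Dict.empty, PySem.Dict.empty)).1 =
      pvRef (max 1 N) [] xs PySem.Dict.empty :=
    pvA_eq_ref N xs [] _ _ (by intro g; simp [PySem.Dict.get?_empty])
  rw [hmax] at hA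
  have hB := pvB_eq_ref xs N N.toNat
    (((PySem.List.enumerate xs).foldl pvGroupStep PySem.Dict.empty).values.foldl
      (fun s positions => pvKeepGroup N s (PySem.List.enumerate positions))
      PySem.Set.empty)
    (by omega) (fun j h => pvKeep_char xs N j h) xs [] PySem.Dict.empty (by simp)
  simp only [List.length_nil, Nat.cast_zero] at hB
  rw [hA, hB]

-- ===== VERDICT (by name: the statement is the Claim_ definition above) =====
theorem build_top_entries_dict_spec : Claim_equal_build_top_entries_dict := by
  intro xs N _ hN
  exact pvAB_eq xs N hN
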